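-- pv_equiv track=rewrite | github.com/walborn/yandex.algorithms | 7/3. Битовые операции, исправляющие коды Хэмминга, сжатие данных/I. Исправление одной ошибки/index.py | find_broken_bit
-- ===== SOURCE A (Python) =====
-- def find_broken_bit(odds):
--   ans = 0
--   pow2 = 1
--   for now in odds:
--     if now & 1 != 0:
--       ans += pow2
--     pow2 <<= 1
--   return ans
-- ===== SOURCE B (Python) =====
-- def find_broken_bit(odds):
--   def go(a):
--     if len(a) <= 1:
--       return a[0] & 1 if a else 0
--     mid = len(a) // 2
--     return go(a[:mid]) + (go(a[mid:]) << mid)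
--   return go(odds)
-- ===== Notes on version B (the rewrite author's own statement) =====
-- stated objective: alternative
-- what changed: Replaces the sequential pow2-accumulator loop with a divide-and-conquer recursion: split the list in half, recursively build each half's value, and combine as low + (high << mid); correct because low-bit-first positional value is additive under concatenation with a 2^mid shift.
import Mathlib
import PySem

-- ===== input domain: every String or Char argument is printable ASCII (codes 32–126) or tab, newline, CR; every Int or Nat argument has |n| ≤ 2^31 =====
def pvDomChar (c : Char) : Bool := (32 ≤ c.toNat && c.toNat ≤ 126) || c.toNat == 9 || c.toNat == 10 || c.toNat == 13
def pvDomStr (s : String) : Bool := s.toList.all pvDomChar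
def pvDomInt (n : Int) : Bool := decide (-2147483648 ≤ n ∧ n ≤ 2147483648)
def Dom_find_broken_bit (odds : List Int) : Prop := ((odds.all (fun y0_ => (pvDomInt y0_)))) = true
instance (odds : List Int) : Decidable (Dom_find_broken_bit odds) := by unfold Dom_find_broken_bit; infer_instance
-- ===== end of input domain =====

-- ===== PORT A =====
-- B replaces A's sequential pow2-accumulator loop with a divide-and-conquer recursion
-- (split in half, combine as low + high * 2^mid): an alternative decomposition, same result.
-- `now & 1` is ported as `now % 2` (Int.emod), exact for Python's bitwise-and with 1 on any int.
def find_broken_bit (odds : List Int) : Int :=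
  (odds.foldl (fun (s : Int × Int) now =>
      ((if now % 2 ≠ 0 then s.1 + s.2 else s.1), s.2 * 2)) (0, 1)).1

-- ===== PORT B =====
-- go: if len ≤ 1 return the single low bit (0 if empty), else split at mid = len/2
-- and combine; `<< mid` ported as `* 2 ^ mid`.
def fbbGo (a : List Int) : Int :=
  if h : a.length ≤ 1 then
    match a with
    | [] => 0
    | x :: _ => x % 2
  else
    let mid := a.length / 2
    fbbGo (a.take mid) + fbbGo (a.drop mid) * 2 ^ mid
termination_by a.length
decreasing_by
  · simp only [List.length_take]; omega
  · simp only [List.length_drop]; omega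

def find_broken_bit_alt (odds : List Int) : Int := fbbGo odds

-- ===== PRECONDITION & SPEC =====
def Spec_find_broken_bit (odds : List Int) (out : Int) : Prop := out = find_broken_bit_alt odds
instance (odds : List Int) (out : Int) : Decidable (Spec_find_broken_bit odds out) := by unfold Spec_find_broken_bit; infer_instance

-- ===== CLAIM (what is proved, stated in full; the proofs are below) =====
def Claim_equal_find_broken_bit : Prop := ∀ (odds : List Int), Dom_find_broken_bit odds → Spec_find_broken_bit odds (find_broken_bit odds)

-- ===== LEMMAS AND PROOFS =====

-- The common reference value: binary value of the low bits, low-bit-first.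
def fbbVal (l : List Int) : Int := l.foldr (fun now ans => ans * 2 + now % 2) 0

-- fbbVal is additive under append, with a 2^|l1| shift on the second part.
theorem fbbVal_append (l1 l2 : List Int) :
    fbbVal (l1 ++ l2) = fbbVal l1 + fbbVal l2 * 2 ^ l1.length := by
  induction l1 with
  | nil => simp [fbbVal]
  | cons x t ih =>
    simp only [List.cons_append, fbbVal, List.foldr_cons, List.length_cons] at *
    rw [ih]; ring

-- B's divide-and-conquer computes fbbVal (strong induction on the length).
theorem fbbGo_eq_val_aux (n : Nat) : ∀ a : List Int, a.length ≤ n → fbbGo a = fbbVal a := by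
  induction n with
  | zero =>
    intro a h
    have ha : a = [] := List.eq_nil_of_length_eq_zero (by omega)
    subst ha
    rw [fbbGo]; simp [fbbVal]
  | succ n ih =>
    intro a h
    rw [fbbGo]
    by_cases h1 : a.length ≤ 1
    · rw [dif_pos h1]
      cases a with
      | nil => simp [fbbVal]
      | cons x t =>
        simp only [List.length_cons] at h1
        have ht : t = [] := List.eq_nil_of_length_eq_zero (by omega)
        subst ht
        simp [fbbVal]
    · rw [dif_neg h1]
      have hlen : 2 ≤ a.length := by omega
      show fbbGo (a.take (a.length / 2)) + fbbGo (a.drop (a.length / 2)) * 2 ^ (a.length / 2)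
            = fbbVal a
      rw [ih _ (by rw [List.length_take]; omega),
          ih _ (by rw [List.length_drop]; omega)]
      have hv := fbbVal_append (a.take (a.length / 2)) (a.drop (a.length / 2))
      rw [List.take_append_drop] at hv
      rw [hv, List.length_take, Nat.min_eq_left (by omega)]

theorem fbbGo_eq_val (a : List Int) : fbbGo a = fbbVal a :=
  fbbGo_eq_val_aux a.length a le_rfl

-- Invariant of A's loop: from state (ans, p), the final ans is ans + p * fbbVal(rest).
theorem find_broken_bit_invariant (l : List Int) (a p : Int) :
    (l.foldl (fun (s : Int × Int) now =>
      ((if now % 2 ≠ 0 then s.1 + s.2 else s.1), s.2 * 2)) (a, p)).1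
      = a + p * fbbVal l := by
  induction l generalizing a p with
  | nil => simp [fbbVal]
  | cons now t ih =>
    simp only [List.foldl_cons, fbbVal, List.foldr_cons] at *
    rw [ih]
    rcases Int.emod_two_eq now with h | h <;> simp [h] <;> ring

-- ===== VERDICT (by name: the statement is the Claim_ definition above) =====
theorem find_broken_bit_spec : Claim_equal_find_broken_bit := by
  intro odds _
  unfold Spec_find_broken_bit find_broken_bit find_broken_bit_alt
  rw [find_broken_bit_invariant, fbbGo_eq_val]
  ring
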